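-- pv_equiv track=rewrite | github.com/CatherineBandarchuk/Algorithm_Practice | arrays4.py | minimum_first_element
-- ===== SOURCE A (Python) =====
-- def minimum_first_element(my_list):
--     minimum = my_list[0]
--     min_index = 0
--     for index in range(len(my_list)):
--         if my_list[index] < minimum:
--             minimum = my_list[index]
--             min_index = index
--
--     temp_from = my_list[0]
--     my_list[0] = minimum
--     step = min_index
--     i = 0
--
--
--     while step > 0:
--         step -= 1
--         temp_to = my_list[i + 1]
--         my_list[i + 1] = temp_from
--         i += 1
--         temp_from = temp_to
--     return my_list
-- ===== SOURCE B (Python) =====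
-- def minimum_first_element(my_list):
--     m = min(my_list)
--     i = my_list.index(m)
--     my_list[:] = [m] + my_list[:i] + my_list[i + 1:]
--     return my_list
-- ===== Notes on version B (the rewrite author's own statement) =====
-- stated objective: simpler
-- what changed: Replaces A's hand-written index-scan for the minimum and its element-by-element shift loop with min()+index() and a single slice-concatenation rebuild assigned in place.
import Mathlib
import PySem

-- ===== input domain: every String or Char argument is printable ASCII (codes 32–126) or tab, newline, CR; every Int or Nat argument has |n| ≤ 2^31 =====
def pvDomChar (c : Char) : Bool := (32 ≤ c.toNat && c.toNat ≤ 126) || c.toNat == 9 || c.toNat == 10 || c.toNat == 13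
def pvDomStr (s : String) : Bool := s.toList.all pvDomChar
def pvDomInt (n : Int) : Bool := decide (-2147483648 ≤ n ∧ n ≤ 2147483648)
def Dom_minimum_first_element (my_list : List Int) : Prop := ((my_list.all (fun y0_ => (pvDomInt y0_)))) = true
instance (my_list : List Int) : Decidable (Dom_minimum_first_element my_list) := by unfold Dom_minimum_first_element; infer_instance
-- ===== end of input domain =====

-- B replaces A's hand-written minimum scan and shift loop by min()+index() and a
-- slice-concatenation rebuild (objective: simpler). Both A and B mutate the list in
-- place the same way (result list == argument list object); the theorems are about
-- the returned value.

-- ===== PORT A =====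
-- the 'while step > 0' shift loop of A: fuel = step (A's step counter, nonnegative)
def pvShift : Nat → Nat → Int → List Int → List Int
  | 0, _, _, l => l
  | step + 1, i, temp_from, l =>
    let temp_to := PySem.List.pyGetD l ((i : Int) + 1) 0
    let l' := l.set (i + 1) temp_from
    pvShift step (i + 1) temp_to l'

def minimum_first_element (my_list : List Int) : List Int :=
  let minimum := PySem.List.pyGetD my_list 0 0   -- my_list[0] (Pre_ gives my_list ≠ [])
  let p := (PySem.List.pyRange 0 my_list.length 1).foldl
    (fun (st : Int × Int) index =>
      if PySem.List.pyGetD my_list index 0 < st.1 then (PySem.List.pyGetD my_list index 0, index)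
      else st)
    (minimum, 0)
  let temp_from := PySem.List.pyGetD my_list 0 0
  let l := my_list.set 0 p.1                      -- my_list[0] = minimum
  pvShift p.2.toNat 0 temp_from l                 -- the while loop, step = min_index

-- ===== PORT B =====
def minimum_first_element_alt (my_list : List Int) : List Int :=
  match PySem.List.min? my_list (fun y => y) with -- min(my_list); none = ValueError, excluded by Pre_
  | none => my_list
  | some m =>
    match PySem.List.index? my_list m with        -- my_list.index(m); always found here
    | none => my_list
    | some i =>
      [m] ++ PySem.List.slice my_list none (some (i : Int))
           ++ PySem.List.slice my_list (some ((i : Int) + 1)) none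

-- ===== PRECONDITION & SPEC =====
-- A raises IndexError (and B's min() raises ValueError) on the empty list; nothing else raises.
def Pre_minimum_first_element (my_list : List Int) : Prop := my_list ≠ []
instance (my_list : List Int) : Decidable (Pre_minimum_first_element my_list) := by
  unfold Pre_minimum_first_element; infer_instance
def pvWitness_minimum_first_element : List Int := [3, 1, 2]

def Spec_minimum_first_element (my_list : List Int) (out : List Int) : Prop :=
  out = minimum_first_element_alt my_list
instance (my_list : List Int) (out : List Int) : Decidable (Spec_minimum_first_element my_list out) := by
  unfold Spec_minimum_first_element; infer_instance

-- ===== CLAIM (what is proved, stated in full; the proofs are below) =====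
def Claim_equal_minimum_first_element : Prop :=
  ∀ (my_list : List Int), Dom_minimum_first_element my_list →
    Pre_minimum_first_element my_list →
    Spec_minimum_first_element my_list (minimum_first_element my_list)

-- ===== LEMMAS AND PROOFS =====

theorem foldl_min_le (t : List Int) (m : Int) : t.foldl min m ≤ m := by
  induction t generalizing m with
  | nil => simp
  | cons v t ih => exact le_trans (ih (min m v)) (min_le_left m v)

-- A's scan over (index, value) pairs computes (min, first index attaining it)
theorem foldl_scan_spec (t : List Int) : ∀ (s m i : Int),
    (PySem.List.enumerate t s).foldl
      (fun (st : Int × Int) p => if p.2 < st.1 then (p.2, p.1) else st) (m, i)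
    = (t.foldl min m,
       if t.foldl min m < m then s + (t.idxOf (t.foldl min m) : Int) else i) := by
  induction t with
  | nil => intro s m i; simp
  | cons v t ih =>
    intro s m i
    rw [PySem.List.enumerate_cons]
    simp only [List.foldl_cons]
    by_cases hv : v < m
    · simp only [if_pos hv]
      rw [ih]
      have hle := foldl_min_le t v
      rcases lt_or_eq_of_le hle with hlt | heq
      · have hmin : min m v = v := min_eq_right hv.le
        have hne : t.foldl min v ≠ v := ne_of_lt hlt
        simp [hmin, if_pos hlt, if_pos (lt_trans hlt hv), hne.symm]
        ring
      · have hmin : min m v = v := min_eq_right hv.le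
        simp [hmin, heq, hv]
    · simp only [if_neg hv]
      rw [ih]
      have hmin : min m v = m := min_eq_left (not_lt.mp hv)
      by_cases hlt : t.foldl min m < m
      · have hne : t.foldl min m ≠ v := ne_of_lt (lt_of_lt_of_le hlt (not_lt.mp hv))
        simp [hmin, if_pos hlt, hne.symm]
        ring
      · simp [hmin, hlt]

-- the shift loop rotates v into the k-slot window starting at i+1
theorem pvShift_spec : ∀ (k i : Nat) (v : Int) (l : List Int), i + 1 + k ≤ l.length →
    pvShift k i v l = l.take (i + 1) ++ (v :: l.drop (i + 1)).take k ++ l.drop (i + 1 + k) := by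
  intro k
  induction k with
  | zero => intro i v l h; simp [pvShift]
  | succ k ih =>
    intro i v l h
    have hi1 : i + 1 < l.length := by omega
    unfold pvShift
    have hget : PySem.List.pyGetD l ((i : Int) + 1) 0 = l[i + 1] := by
      have : ((i : Int) + 1) = ((i + 1 : Nat) : Int) := by push_cast; ring
      rw [this, PySem.List.pyGetD_natCast, List.getD_eq_getElem?_getD,
        List.getElem?_eq_getElem hi1]; rfl
    rw [hget, ih (i + 1) (l[i + 1]) (l.set (i + 1) v) (by simpa using by omega)]
    have hset_take : (l.set (i + 1) v).take (i + 1 + 1) = l.take (i + 1) ++ [v] := by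
      rw [List.set_eq_take_append_cons_drop, if_pos hi1]
      rw [List.take_append]
      simp [List.length_take, Nat.min_eq_left hi1.le]
    have hset_drop : (l.set (i + 1) v).drop (i + 1 + 1) = l.drop (i + 1 + 1) := by
      exact List.drop_set_of_lt (by omega)
    have hdrop : l.drop (i + 1) = l[i + 1] :: l.drop (i + 1 + 1) := by
      rw [List.drop_eq_getElem_cons hi1]
    rw [hset_take, hset_drop, hdrop]
    simp only [List.take_succ_cons]
    have : i + 1 + 1 + k = i + 1 + (k + 1) := by omega
    rw [this, List.drop_set_of_lt (by omega)]
    simp [List.append_assoc]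

theorem idxOf?_eq_some_idxOf (l : List Int) (v : Int) (h : v ∈ l) :
    List.idxOf? v l = some (l.idxOf v) := by
  induction l with
  | nil => simp at h
  | cons x t ih =>
    by_cases hx : x = v
    · subst hx; simp [List.idxOf?_cons]
    · have hv : v ∈ t := by simpa [hx, Ne.symm hx] using h
      simp [List.idxOf?_cons, hx, ih hv]

-- ===== VERDICT (by name: the statement is the Claim_ definition above) =====
theorem minimum_first_element_spec : Claim_equal_minimum_first_element := by
  unfold Claim_equal_minimum_first_element
  intro xs _ hpre
  unfold Pre_minimum_first_element at hpre
  obtain ⟨x, t, rfl⟩ := List.exists_cons_of_ne_nil hpre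
  unfold Spec_minimum_first_element
  set M : Int := t.foldl min x with hM
  have hmin? : PySem.List.min? (x :: t) (fun y => y) = some M := by
    rw [hM]; exact PySem.List.min?_id_cons x t
  have hMmem : M ∈ x :: t := PySem.List.min?_mem hmin?
  set K : Nat := (x :: t).idxOf M with hK
  have hKlen : K < (x :: t).length := List.idxOf_lt_length_of_mem hMmem
  have hKt : K ≤ t.length := by simpa using Nat.lt_succ_iff.mp (by simpa using hKlen)
  -- the scan of port A computes (M, K)
  have hscan :
      (PySem.List.pyRange 0 ((x :: t).length : Int) 1).foldl
        (fun (st : Int × Int) index =>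
          if PySem.List.pyGetD (x :: t) index 0 < st.1
          then (PySem.List.pyGetD (x :: t) index 0, index) else st)
        ((x : Int), 0)
      = (M, (K : Int)) := by
    have hmap := PySem.List.enumerate_eq_map_pyRange (xs := x :: t) (d := (0 : Int))
    have hfold :
        (PySem.List.pyRange 0 ((x :: t).length : Int) 1).foldl
          (fun (st : Int × Int) index =>
            if PySem.List.pyGetD (x :: t) index 0 < st.1
            then (PySem.List.pyGetD (x :: t) index 0, index) else st)
          ((x : Int), 0)
        = (PySem.List.enumerate (x :: t) 0).foldl
            (fun (st : Int × Int) p => if p.2 < st.1 then (p.2, p.1) else st)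
            ((x : Int), 0) := by
      rw [hmap, List.foldl_map]; rfl
    rw [hfold, foldl_scan_spec]
    have hfx : (x :: t).foldl min x = M := by simp [hM]
    rw [hfx]
    by_cases hlt : M < x
    · have hne : M ≠ x := ne_of_lt hlt
      simp [if_pos hlt, hK, Ne.symm hne]
    · have heq : M = x := le_antisymm (foldl_min_le t x) (not_lt.mp hlt)
      simp [hK, heq]
  -- port A reduces to the rotated list
  have hA : minimum_first_element (x :: t) = M :: (x :: t).take K ++ t.drop K := by
    unfold minimum_first_element
    simp only [hscan, PySem.List.pyGetD_zero_cons, List.set_cons_zero, Int.toNat_natCast]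
    rw [pvShift_spec K 0 x (M :: t) (by simp only [List.length_cons]; omega)]
    simp [Nat.add_comm 1 K]
  -- port B reduces to the same list
  have hB : minimum_first_element_alt (x :: t) = M :: (x :: t).take K ++ t.drop K := by
    unfold minimum_first_element_alt
    have hidx : PySem.List.index? (x :: t) M = some K := by
      simp [PySem.List.index?_eq_idxOf?, idxOf?_eq_some_idxOf _ _ hMmem, hK]
    simp only [hmin?, hidx]
    rw [PySem.List.slice_to_natCast]
    have hcast : ((K : Int) + 1) = ((K + 1 : Nat) : Int) := by push_cast; ring
    rw [hcast, PySem.List.slice_from_natCast]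
    simp
  rw [hA, hB]
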